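-- pv_equiv track=rewrite | github.com/Ruin0x11/chroma-scripts | osc/config.py | maplights
-- ===== SOURCE A (Python) =====
-- order = [
--   0,   1,   2,   3,   4,   5,
--   6,   7,   8,   9,   10,  11,
--   12,  13,  14,  15,  16,  17,
--   18,  19,  20,  21,  22,  23,
--   24,  25,  26,  27,  28,  29,
--   30,  31,  32,  33,  34,  35,
--   36,  37,  38,  39,  40,  41,
--   42,  43,  44,  45,  46,  47,
-- ]
--
-- def maplights(array):
-- 	"""
-- 	Given a list of n tuples in the form of (R,G,B), return a list of the same size,
-- 	corresponding to how they're arranged on the ceiling.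
-- 	"""
-- 	out = [(0,0,0)]*len(order)
-- 	for i in range(len(order)):
-- 	  try:
-- 	    out[order[i]] = array[i]
-- 	  except IndexError:
-- 	    pass
--
-- 	return out
-- ===== SOURCE B (Python) =====
-- def maplights(array):
--     """
--     Given a list of n tuples in the form of (R,G,B), return a list of the same size,
--     corresponding to how they're arranged on the ceiling.
--     """
--     head = list(array[:48])
--     return head + [(0, 0, 0)] * (48 - len(head))
-- ===== Notes on version B (the rewrite author's own statement) =====
-- stated objective: simpler
-- what changed: Replaced the preallocated output array, the identity permutation lookup and the indexed try/except loop with a direct slice of the first 48 tuples padded to length 48 with (0,0,0).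
import Mathlib
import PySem

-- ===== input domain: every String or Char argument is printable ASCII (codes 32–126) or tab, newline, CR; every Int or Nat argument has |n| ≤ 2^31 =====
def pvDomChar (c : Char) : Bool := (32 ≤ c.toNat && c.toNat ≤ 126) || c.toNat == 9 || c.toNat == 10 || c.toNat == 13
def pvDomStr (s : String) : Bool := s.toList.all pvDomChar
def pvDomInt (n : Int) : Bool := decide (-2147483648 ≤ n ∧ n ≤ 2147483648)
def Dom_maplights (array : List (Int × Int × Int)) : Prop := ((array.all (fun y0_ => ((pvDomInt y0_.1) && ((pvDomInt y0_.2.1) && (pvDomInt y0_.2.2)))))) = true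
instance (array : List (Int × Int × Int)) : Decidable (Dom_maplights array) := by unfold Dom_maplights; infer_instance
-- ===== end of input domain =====

-- B replaces A's preallocated output + identity-permutation try/except loop by a slice padded
-- to length 48 (objective: simpler).

-- ===== PORT A =====
def orderA : List Int :=
  [0, 1, 2, 3, 4, 5, 6, 7, 8, 9, 10, 11, 12, 13, 14, 15, 16, 17, 18, 19, 20, 21, 22, 23,
   24, 25, 26, 27, 28, 29, 30, 31, 32, 33, 34, 35, 36, 37, 38, 39, 40, 41, 42, 43, 44, 45, 46, 47]

-- Python list item assignment `xs[j] = v` (negative index from the end; none = IndexError);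
-- ported by hand (no PySem primitive for item assignment), exact.
def pyAssign? {α : Type} (xs : List α) (j : Int) (v : α) : Option (List α) :=
  if 0 ≤ j then
    if j < xs.length then some (xs.set j.toNat v) else none
  else
    if (-j) ≤ xs.length then some (xs.set (xs.length - (-j).toNat) v) else none

-- body of A's loop: `try: out[order[i]] = array[i] except IndexError: pass`
def maplightsStep (array : List (Int × Int × Int)) (out : List (Int × Int × Int)) (i : Int) :
    List (Int × Int × Int) :=
  match PySem.List.pyGet? array i, PySem.List.pyGet? orderA i with
  | some v, some j =>
      match pyAssign? out j v with
      | some out' => out'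
      | none => out
  | _, _ => out

def maplights (array : List (Int × Int × Int)) : List (Int × Int × Int) :=
  let out := List.replicate orderA.length ((0 : Int), (0 : Int), (0 : Int))
  (PySem.List.pyRange 0 (orderA.length : Int) 1).foldl (maplightsStep array) out

-- ===== PORT B =====
def maplights_alt (array : List (Int × Int × Int)) : List (Int × Int × Int) :=
  let head := PySem.List.slice array none (some 48)
  head ++ List.replicate (48 - head.length) ((0 : Int), (0 : Int), (0 : Int))

-- ===== PRECONDITION & SPEC =====
def Spec_maplights (array : List (Int × Int × Int)) (out : List (Int × Int × Int)) : Prop := out = maplights_alt array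
instance (array : List (Int × Int × Int)) (out : List (Int × Int × Int)) : Decidable (Spec_maplights array out) := by unfold Spec_maplights; infer_instance

-- ===== CLAIM (what is proved, stated in full; the proofs are below) =====
def Claim_equal_maplights : Prop := ∀ (array : List (Int × Int × Int)), Dom_maplights array → Spec_maplights array (maplights array)

-- ===== LEMMAS AND PROOFS =====

theorem orderA_get (k : Nat) (hk : k < 48) : orderA[k]? = some (k : Int) := by
  revert hk; revert k; decide

-- loop invariant: having processed indices < k, the state is `pre ++ replicate (48-k) z`,
-- and the remaining iterations fill in `array.drop k` then leave the zero padding.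
theorem maplights_loop (array : List (Int × Int × Int)) (n : Nat) :
    ∀ (k : Nat) (pre : List (Int × Int × Int)), pre.length = k → k + n = 48 →
    (PySem.List.pyRange (k : Int) 48 1).foldl (maplightsStep array)
        (pre ++ List.replicate n ((0 : Int), (0 : Int), (0 : Int)))
      = pre ++ (array.drop k).take n
          ++ List.replicate (n - (array.drop k).length) ((0 : Int), (0 : Int), (0 : Int)) := by
  induction n with
  | zero =>
    intro k pre hpre hkn
    rw [PySem.List.pyRange_one_eq_nil (by omega)]
    simp
  | succ m ih =>
    intro k pre hpre hkn
    rw [PySem.List.pyRange_one_cons (by omega : (k : Int) < 48)]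
    simp only [List.foldl_cons]
    have hcast : ((k : Int) + 1) = ((k + 1 : Nat) : Int) := by push_cast; ring
    by_cases hlen : k < array.length
    · have harr : array[k]? = some array[k] := List.getElem?_eq_getElem hlen
      have hdropc : array.drop k = array[k] :: array.drop (k + 1) :=
        List.drop_eq_getElem_cons hlen
      have hstep : maplightsStep array
          (pre ++ List.replicate (m + 1) ((0 : Int), (0 : Int), (0 : Int))) (k : Int)
          = (pre ++ [array[k]]) ++ List.replicate m ((0 : Int), (0 : Int), (0 : Int)) := by
        unfold maplightsStep
        rw [PySem.List.pyGet?_natCast, PySem.List.pyGet?_natCast, orderA_get k (by omega), harr]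
        simp only [pyAssign?]
        rw [if_pos (by positivity), if_pos (by simp; omega)]
        simp [List.replicate_succ, hpre]
      rw [hstep, hcast, ih (k + 1) (pre ++ [array[k]]) (by simp [hpre]) (by omega)]
      have hcnt : m + 1 - (array.drop k).length = m - (array.drop (k + 1)).length := by
        simp [List.length_drop]; omega
      rw [hcnt, hdropc, List.take_succ_cons]
      simp
    · have harr : array[k]? = none := List.getElem?_eq_none (by omega)
      have hdrop : array.drop k = [] := List.drop_eq_nil_of_le (by omega)
      have hdrop' : array.drop (k + 1) = [] := List.drop_eq_nil_of_le (by omega)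
      have hstep : maplightsStep array
          (pre ++ List.replicate (m + 1) ((0 : Int), (0 : Int), (0 : Int))) (k : Int)
          = (pre ++ [((0 : Int), (0 : Int), (0 : Int))])
              ++ List.replicate m ((0 : Int), (0 : Int), (0 : Int)) := by
        unfold maplightsStep
        rw [PySem.List.pyGet?_natCast, harr]
        simp [List.replicate_succ]
      rw [hstep, hcast, ih (k + 1) (pre ++ [((0 : Int), (0 : Int), (0 : Int))]) (by simp [hpre]) (by omega)]
      rw [hdrop, hdrop']
      simp [List.replicate_succ]

-- ===== VERDICT (by name: the statement is the Claim_ definition above) =====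
theorem maplights_spec : Claim_equal_maplights := by
  intro array _
  unfold Spec_maplights maplights maplights_alt
  have h := maplights_loop array 48 0 [] rfl rfl
  simp only [List.drop_zero, List.nil_append] at h
  have hslice := PySem.List.slice_to array (show (0 : Int) ≤ 48 by norm_num)
  norm_num at hslice
  simp only [show orderA.length = 48 from rfl, hslice]
  push_cast at h ⊢
  rw [h]
  congr 1
  simp [List.length_take]
  omega
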